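-- pv_equiv track=rewrite | github.com/hyo-nu/SSAFY9 | SSAFY_Algorithm/0210_문제풀이2/SE_D2_1979_어디에 단어가 들어가누_HW.py | count
-- ===== SOURCE A (Python) =====
-- def count(arr, N, K):
--     result = 0
--     for lst in arr: # 2차원 배열에서 한 행씩 리스트로 반환
--         cnt = 0
--         for i in range(N):
--             if lst[i] == 1 : cnt += 1 # 리스트 요소가 1이면 cnt 세기
--             else:
--                 if cnt == K : result += 1 # 요소가 1 아닐 때, cnt가 K면 단어가 들어갈 수 있음
--                 cnt = 0 # 대신 공간의 연속이 끊겼으므로 cnt 0으로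
--         if cnt == K: result += 1 # 한 리스트 요소 체크가 끝났을 때 cnt가 k면 단어가 들어갈 수 있음
--     return result
-- ===== SOURCE B (Python) =====
-- def count(arr, N, K):
--     result = 0
--     for lst in arr:
--         s = ''.join('1' if lst[i] == 1 else '0' for i in range(N))
--         result += sum(1 for seg in s.split('0') if len(seg) == K)
--     return result
-- ===== Notes on version B (the rewrite author's own statement) =====
-- stated objective: idiomatic
-- what changed: Replaces the stateful run-counter with flags with an explicit segmentation: each row is rendered as a '1'/'0' string, split on '0', and segments of length exactly K are counted.
import Mathlib
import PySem

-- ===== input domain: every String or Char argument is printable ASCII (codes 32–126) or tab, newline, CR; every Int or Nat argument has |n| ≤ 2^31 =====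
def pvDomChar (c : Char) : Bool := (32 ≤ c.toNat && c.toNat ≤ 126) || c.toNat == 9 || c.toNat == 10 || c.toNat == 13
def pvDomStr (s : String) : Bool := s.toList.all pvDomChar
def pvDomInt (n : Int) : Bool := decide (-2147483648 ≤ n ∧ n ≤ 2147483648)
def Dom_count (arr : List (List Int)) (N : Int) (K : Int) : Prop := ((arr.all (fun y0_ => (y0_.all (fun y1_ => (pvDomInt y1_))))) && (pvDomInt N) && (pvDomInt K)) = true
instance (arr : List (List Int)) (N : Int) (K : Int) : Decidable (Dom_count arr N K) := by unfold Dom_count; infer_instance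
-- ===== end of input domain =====

-- B says the same thing as A by explicit segmentation (split on '0') instead of a stateful run counter; idiomatic, not faster.

-- ===== PORT A =====
-- literal transliteration of A: outer fold over rows, inner fold over range(N) carrying (cnt, result);
-- lst[i] is pyGetD (total form), exact under Pre_count which puts every index in range.
def count (arr : List (List Int)) (N : Int) (K : Int) : Int :=
  arr.foldl (fun result lst =>
    let p := (PySem.List.pyRange 0 N 1).foldl
      (fun (s : Int × Int) i =>
        if PySem.List.pyGetD lst i 0 = 1 then (s.1 + 1, s.2)
        else (0, if s.1 = K then s.2 + 1 else s.2))
      (0, result)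
    if p.1 = K then p.2 + 1 else p.2) 0

-- ===== PORT B =====
-- B-side helper: sum(1 for seg in s.split('0') if len(seg) == K); str.split('0') ported as List.splitOn '0'
def segCount (K : Int) (s : List Char) : Int :=
  ((s.splitOn '0').filter (fun seg => (seg.length : Int) = K)).length

def count_alt (arr : List (List Int)) (N : Int) (K : Int) : Int :=
  arr.foldl (fun result lst =>
    let s : List Char := (PySem.List.pyRange 0 N 1).map
      (fun i => if PySem.List.pyGetD lst i 0 = 1 then '1' else '0')
    result + segCount K s) 0

-- ===== PRECONDITION & SPEC =====
-- Pre_count excludes exactly the IndexError inputs: some row shorter than N (both A and B raise there).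
def Pre_count (arr : List (List Int)) (N : Int) (K : Int) : Prop :=
  ∀ lst ∈ arr, N ≤ (lst.length : Int)
instance (arr : List (List Int)) (N : Int) (K : Int) : Decidable (Pre_count arr N K) := by unfold Pre_count; infer_instance
def pvWitness_count : List (List Int) × Int × Int := ([[1, 1, 0, 1], [0, 1, 1, 0]], 4, 2)

def Spec_count (arr : List (List Int)) (N : Int) (K : Int) (out : Int) : Prop := out = count_alt arr N K
instance (arr : List (List Int)) (N : Int) (K : Int) (out : Int) : Decidable (Spec_count arr N K out) := by unfold Spec_count; infer_instance

-- ===== CLAIM (what is proved, stated in full; the proofs are below) =====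
def Claim_equal_count : Prop := ∀ (arr : List (List Int)) (N : Int) (K : Int), Dom_count arr N K → Pre_count arr N K → Spec_count arr N K (count arr N K)

-- ===== LEMMAS AND PROOFS =====

theorem splitOn_of_not_mem (xs : List Char) (h : '0' ∉ xs) : xs.splitOn '0' = [xs] := by
  induction xs with
  | nil => rfl
  | cons x xs ih =>
    simp only [List.mem_cons, not_or] at h
    have hxs := ih h.2
    simp only [List.splitOn] at hxs ⊢
    rw [List.splitOnP_cons, if_neg (by simp only [beq_iff_eq]; exact fun e => h.1 e.symm), hxs]
    rfl

theorem splitOn_append_zero (pre rest : List Char) (h : '0' ∉ pre) :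
    (pre ++ '0' :: rest).splitOn '0' = pre :: rest.splitOn '0' := by
  induction pre with
  | nil => simp [List.splitOn, List.splitOnP_cons]
  | cons x xs ih =>
    simp only [List.mem_cons, not_or] at h
    simp only [List.cons_append, List.splitOn, List.splitOnP_cons, beq_iff_eq] at *
    rw [ih h.2, if_neg (fun e => h.1 e.symm)]
    rfl

theorem not_mem_replicate_one (n : Nat) : '0' ∉ List.replicate n '1' := by
  simp [List.mem_replicate]

theorem segCount_ones (K : Int) (c : Int) (hc : 0 ≤ c) :
    segCount K (List.replicate c.toNat '1') = if c = K then 1 else 0 := by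
  simp only [segCount, splitOn_of_not_mem _ (not_mem_replicate_one _),
    List.filter_cons, List.filter_nil, List.length_replicate]
  by_cases h : c = K
  · rw [if_pos (by simp only [decide_eq_true_eq]; omega), if_pos h]
    simp
  · rw [if_neg (by simp only [decide_eq_true_eq]; omega), if_neg h]
    simp

theorem segCount_break (K : Int) (c : Int) (hc : 0 ≤ c) (rest : List Char) :
    segCount K (List.replicate c.toNat '1' ++ '0' :: rest)
      = (if c = K then 1 else 0) + segCount K rest := by
  simp only [segCount, splitOn_append_zero _ _ (not_mem_replicate_one _),
    List.filter_cons, List.length_replicate]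
  by_cases h : c = K
  · rw [if_pos (by simp only [decide_eq_true_eq]; omega), if_pos h, List.length_cons]
    push_cast; ring
  · rw [if_neg (by simp only [decide_eq_true_eq]; omega), if_neg h]
    simp

-- the per-row invariant: A's run-counter fold with state (c, r) versus B's segmentation,
-- с ones already pending
theorem row_eq (lst : List Int) (K : Int) (I : List Int) (c r : Int) (hc : 0 ≤ c) :
    (let p := I.foldl
        (fun (s : Int × Int) i =>
          if PySem.List.pyGetD lst i 0 = 1 then (s.1 + 1, s.2)
          else (0, if s.1 = K then s.2 + 1 else s.2)) (c, r)
      if p.1 = K then p.2 + 1 else p.2)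
      = r + segCount K (List.replicate c.toNat '1' ++
          I.map (fun i => if PySem.List.pyGetD lst i 0 = 1 then '1' else '0')) := by
  induction I generalizing c r with
  | nil =>
    simp only [List.foldl_nil, List.map_nil, List.append_nil]
    rw [segCount_ones K c hc]
    by_cases h : c = K <;> simp [h]
  | cons i I ih =>
    by_cases h : PySem.List.pyGetD lst i 0 = 1
    · simp only [List.foldl_cons, List.map_cons, if_pos h]
      rw [ih (c + 1) r (by omega)]
      congr 2
      have : (c + 1).toNat = c.toNat + 1 := by omega
      rw [this, List.replicate_succ']
      simp
    · simp only [List.foldl_cons, List.map_cons, if_neg h]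
      rw [ih 0 (if c = K then r + 1 else r) (by omega)]
      rw [segCount_break K c hc]
      simp only [Int.toNat_zero, List.replicate_zero, List.nil_append]
      by_cases hck : c = K <;> simp [hck] <;> omega

-- ===== VERDICT (by name: the statement is the Claim_ definition above) =====
theorem count_spec : Claim_equal_count := by
  unfold Claim_equal_count
  intro arr N K _hdom _hpre
  unfold Spec_count count count_alt
  have hfun : (fun (result : Int) (lst : List Int) =>
      let p := (PySem.List.pyRange 0 N 1).foldl
        (fun (s : Int × Int) i =>
          if PySem.List.pyGetD lst i 0 = 1 then (s.1 + 1, s.2)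
          else (0, if s.1 = K then s.2 + 1 else s.2))
        (0, result)
      if p.1 = K then p.2 + 1 else p.2)
      = (fun (result : Int) (lst : List Int) =>
      result + segCount K ((PySem.List.pyRange 0 N 1).map
        (fun i => if PySem.List.pyGetD lst i 0 = 1 then '1' else '0'))) := by
    funext result lst
    have h := row_eq lst K (PySem.List.pyRange 0 N 1) 0 result le_rfl
    simpa using h
  rw [hfun]
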